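-- pv_equiv track=rewrite | github.com/Kawser-nerd/CLCDSA | Source Codes/AtCoder/arc008/B/4790424.py | solve
-- ===== SOURCE A (Python) =====
-- def solve(name, kit):
--     cnt = dict()
--     for c in name:
--         cnt[c] = cnt.get(c, 0) + 1
--
--     r = 0
--     for c, i in cnt.items():
--         kitCount = kit.count(c)
--         if kitCount == 0:
--             return -1
--         r = max(r, ceilDiv(i, kitCount))
--
--     return r
--
-- def ceilDiv(x, y):
--     r = x % y
--     if r == 0:
--         return x // y
--     else:
--         return x // y + 1
-- ===== SOURCE B (Python) =====
-- def solve(name, kit):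
--     chars = set(name)
--     if any(kit.count(c) == 0 for c in chars):
--         return -1
--     lo, hi = 0, len(name)
--     while lo < hi:
--         mid = (lo + hi) // 2
--         if all(mid * kit.count(c) >= name.count(c) for c in chars):
--             hi = mid
--         else:
--             lo = mid + 1
--     return lo
-- ===== Notes on version B (the rewrite author's own statement) =====
-- stated objective: alternative
-- what changed: Replaces the dict-building loop with per-char ceiling division by a binary search on the answer: the smallest r in [0, len(name)] such that r copies of kit cover every letter's demand.
import Mathlib
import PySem

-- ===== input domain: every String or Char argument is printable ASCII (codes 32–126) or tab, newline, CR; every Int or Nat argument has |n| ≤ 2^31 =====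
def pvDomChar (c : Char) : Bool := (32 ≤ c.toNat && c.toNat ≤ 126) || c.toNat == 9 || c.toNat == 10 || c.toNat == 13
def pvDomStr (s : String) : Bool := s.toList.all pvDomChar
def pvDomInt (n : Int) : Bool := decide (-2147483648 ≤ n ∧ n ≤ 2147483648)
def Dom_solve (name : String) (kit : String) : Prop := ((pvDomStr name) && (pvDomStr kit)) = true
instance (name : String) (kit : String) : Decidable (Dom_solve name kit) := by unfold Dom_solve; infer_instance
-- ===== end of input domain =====

-- B replaces A's running max of ceiling divisions by a binary search for the least
-- sufficient number of kits; alternative algorithm of similar cost, proved equal.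


-- ===== PORT A =====
def ceilDiv (x : Int) (y : Int) : Int :=
  let r := PySem.Int.mod x y
  if r = 0 then PySem.Int.floordiv x y else PySem.Int.floordiv x y + 1

-- the 'for c, i in cnt.items()' loop with its early 'return -1'
def solveLoopA (kit : String) : List (Char × Int) → Int → Int
  | [], r => r
  | (c, i) :: rest, r =>
    let kitCount : Int := (PySem.Str.count kit (String.singleton c) : Int)
    if kitCount = 0 then -1
    else solveLoopA kit rest (max r (ceilDiv i kitCount))

def solve (name : String) (kit : String) : Int :=
  let cnt := name.toList.foldl (fun d c => d.insert c (d.getD c 0 + 1))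
      (PySem.Dict.empty : PySem.Dict Char Int)
  solveLoopA kit cnt.items 0

-- ===== PORT B =====
def feasB (name : String) (kit : String) (chars : List Char) (r : Int) : Bool :=
  chars.all (fun c =>
    decide ((PySem.Str.count name (String.singleton c) : Int) ≤
            r * (PySem.Str.count kit (String.singleton c) : Int)))

def bsearchB (P : Int → Bool) (lo : Int) (hi : Int) : Int :=
  if h : lo < hi then
    let mid := PySem.Int.floordiv (lo + hi) 2
    if P mid then bsearchB P lo mid else bsearchB P (mid + 1) hi
  else lo
termination_by (hi - lo).toNat
decreasing_by
  · have h1 := (PySem.Int.floordiv_lt_iff_lt_mul (a := lo + hi) (q := hi) (by omega : (0:Int) < 2)).mpr (by omega)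
    omega
  · have h2 := (PySem.Int.le_floordiv_iff_mul_le (a := lo + hi) (q := lo) (by omega : (0:Int) < 2)).mpr (by omega)
    omega

def solve_alt (name : String) (kit : String) : Int :=
  let chars := PySem.Set.ofList name.toList
  if chars.any (fun c => PySem.Str.count kit (String.singleton c) == 0) then -1
  else bsearchB (feasB name kit chars) 0 (PySem.Str.len name)

-- ===== PRECONDITION & SPEC =====
def Spec_solve (name : String) (kit : String) (out : Int) : Prop := out = solve_alt name kit
instance (name : String) (kit : String) (out : Int) : Decidable (Spec_solve name kit out) := by unfold Spec_solve; infer_instance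

-- ===== CLAIM (what is proved, stated in full; the proofs are below) =====
def Claim_equal_solve : Prop := ∀ (name : String) (kit : String), Dom_solve name kit → Spec_solve name kit (solve name kit)

-- ===== LEMMAS AND PROOFS =====

-- str.count of a single-character needle is List.count
lemma count_go_single (c : Char) : ∀ (l : List Char) (fuel acc : Nat), l.length ≤ fuel →
    PySem.Chars.count.go [c] fuel l acc = acc + l.count c := by
  intro l
  induction l with
  | nil => intro fuel acc _; cases fuel <;> simp [PySem.Chars.count.go]
  | cons h t ih =>
    intro fuel acc hf
    cases fuel with
    | zero => simp at hf
    | succ n =>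
      have hf' : t.length ≤ n := by simpa using hf
      simp only [PySem.Chars.count.go, List.isPrefixOf]
      by_cases hc : c = h
      · subst hc
        simp [ih n (acc + 1) hf']
        omega
      · simp [Ne.symm hc, hc, ih n acc hf']

lemma count_single (s : List Char) (c : Char) :
    PySem.Chars.count s [c] = s.count c := by
  simp [PySem.Chars.count, count_go_single c s s.length 0 le_rfl]

lemma str_count_singleton (s : String) (c : Char) :
    PySem.Str.count s (String.singleton c) = s.toList.count c := by
  rw [PySem.Str.count_eq]
  have h : (String.singleton c).toList = [c] := by simp
  rw [h, count_single]

-- ceiling division bracket: for y > 0, ceilDiv x y ≤ r ↔ x ≤ r * y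
lemma ceilDiv_le_iff {x y r : Int} (hy : 0 < y) : ceilDiv x y ≤ r ↔ x ≤ r * y := by
  have hqm := PySem.Int.floordiv_mul_add_mod x y
  have hm0 := PySem.Int.mod_nonneg x hy
  have hml := PySem.Int.mod_lt x hy
  have hrw : ceilDiv x y = if PySem.Int.mod x y = 0 then PySem.Int.floordiv x y
      else PySem.Int.floordiv x y + 1 := rfl
  rw [hrw]
  split_ifs with h
  · constructor
    · intro hr; nlinarith
    · intro hr
      have h1 : PySem.Int.floordiv x y * y ≤ r * y := by linarith
      have h2 := le_of_mul_le_mul_right h1 hy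
      omega
  · constructor
    · intro hr; nlinarith
    · intro hr
      have hm1 : 1 ≤ PySem.Int.mod x y := by omega
      have h1 : PySem.Int.floordiv x y * y < r * y := by linarith
      have h2 := lt_of_mul_lt_mul_right h1 (le_of_lt hy)
      omega

-- characterisation of A's foldl-max: it is ≤ x iff the seed and every entry is
lemma foldl_max_le_iff (f : Char → Int) (l : List Char) (r0 x : Int) :
    l.foldl (fun r c => max r (f c)) r0 ≤ x ↔ r0 ≤ x ∧ ∀ c ∈ l, f c ≤ x := by
  induction l generalizing r0 with
  | nil => simp
  | cons h t ih =>
    simp [ih]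
    tauto

-- A's items loop: early -1, else a foldl of maxes
lemma loopA_eq (kit : String) (f : Char → Int) (l : List Char) (r : Int) :
    solveLoopA kit (l.map (fun k => (k, f k))) r =
      if l.any (fun c => PySem.Str.count kit (String.singleton c) == 0) then -1
      else l.foldl (fun r c => max r (ceilDiv (f c) (PySem.Str.count kit (String.singleton c) : Int))) r := by
  induction l generalizing r with
  | nil => simp [solveLoopA]
  | cons h t ih =>
    simp only [List.map, solveLoopA, List.any_cons, List.foldl_cons]
    by_cases hz : PySem.Chars.count kit.toList [h] = 0
    · simp [hz]
    · simp [hz, ih]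

-- binary search returns the threshold of a monotone predicate
lemma bsearch_eq (P : Int → Bool) (M : Int)
    (hc : ∀ r, 0 ≤ r → (P r = true ↔ M ≤ r)) :
    ∀ (n : Nat) (lo hi : Int), (hi - lo).toNat ≤ n → 0 ≤ lo → lo ≤ M → M ≤ hi →
    bsearchB P lo hi = M := by
  intro n
  induction n with
  | zero => intro lo hi hn h0 h1 h2; unfold bsearchB; have : ¬ lo < hi := by omega
            simp [this]; omega
  | succ k ih =>
    intro lo hi hn h0 h1 h2
    unfold bsearchB
    by_cases h : lo < hi
    · simp only [h, dif_pos]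
      have hmid1 := (PySem.Int.floordiv_lt_iff_lt_mul (a := lo + hi) (q := hi) (by omega : (0:Int) < 2)).mpr (by omega)
      have hmid2 := (PySem.Int.le_floordiv_iff_mul_le (a := lo + hi) (q := lo) (by omega : (0:Int) < 2)).mpr (by omega)
      set mid := PySem.Int.floordiv (lo + hi) 2 with hm
      by_cases hp : P mid = true
      · have hMm : M ≤ mid := (hc mid (by omega)).mp hp
        simp only [hp, if_pos]
        exact ih lo mid (by omega) h0 h1 hMm
      · have hMm : ¬ M ≤ mid := fun hle => hp ((hc mid (by omega)).mpr hle)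
        simp only [hp, if_neg, Bool.false_eq_true, not_false_iff]
        exact ih (mid + 1) hi (by omega) (by omega) (by omega) h2
    · simp [h]; omega

theorem solve_eq_alt (name kit : String) : solve name kit = solve_alt name kit := by
  simp only [solve, solve_alt, PySem.Dict.foldl_insert_getD_add_one_eq_counter,
    PySem.Dict.items_counter]
  rw [loopA_eq kit (fun k => (List.count k name.toList : Int)) (PySem.Set.ofList name.toList) 0]
  set L := PySem.Set.ofList name.toList with hL
  by_cases hz : L.any (fun c => PySem.Str.count kit (String.singleton c) == 0)
  · have hex : ∃ x ∈ L, PySem.Chars.count kit.toList [x] = 0 := by simpa using hz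
    simp [hex]
  · simp only [str_count_singleton]
    have hzf : (List.any L fun c => List.count c kit.toList == 0) = false := by
      rw [Bool.not_eq_true, List.any_eq_false] at hz
      rw [List.any_eq_false]
      intro c hc
      have h1 := hz c hc
      rw [PySem.Str.count_eq, show (String.singleton c).toList = [c] from by simp, count_single] at h1
      simpa using h1
    simp only [hzf, Bool.false_eq_true, if_false]
    -- no letter is missing: every kit count is positive on the distinct letters of name
    have hpos : ∀ c ∈ L, 0 < ((List.count c kit.toList : Nat) : Int) := by
      intro c hc
      rw [List.any_eq_false] at hzf
      have h2 : List.count c kit.toList ≠ 0 := by simpa using hzf c hc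
      omega
    set M := L.foldl
      (fun r c => max r (ceilDiv ((List.count c name.toList : Int)) ((List.count c kit.toList : Nat) : Int))) 0 with hM
    have hMle : ∀ x : Int, M ≤ x ↔ 0 ≤ x ∧ ∀ c ∈ L,
        ceilDiv ((List.count c name.toList : Int)) ((List.count c kit.toList : Nat) : Int) ≤ x := by
      intro x
      exact foldl_max_le_iff _ L 0 x
    have hc : ∀ r : Int, 0 ≤ r → (feasB name kit L r = true ↔ M ≤ r) := by
      intro r hr
      unfold feasB
      rw [hMle r]
      simp only [List.all_eq_true, decide_eq_true_eq, str_count_singleton]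
      constructor
      · intro hall
        refine ⟨hr, fun c hcm => ?_⟩
        exact (ceilDiv_le_iff (hpos c hcm)).mpr (hall c hcm)
      · intro ⟨_, hall⟩ c hcm
        exact (ceilDiv_le_iff (hpos c hcm)).mp (hall c hcm)
    have hM0 : 0 ≤ M := ((hMle M).mp le_rfl).1
    have hlen : PySem.Str.len name = (name.toList.length : Int) := by
      simp [PySem.Str.len_eq]
    have hMn : M ≤ PySem.Str.len name := by
      rw [hlen, hMle]
      refine ⟨by positivity, fun c hcm => ?_⟩
      rw [ceilDiv_le_iff (hpos c hcm)]
      have h1 : (List.count c name.toList : Int) ≤ (name.toList.length : Int) := by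
        exact_mod_cast List.count_le_length
      have h2 := hpos c hcm
      nlinarith [Int.natCast_nonneg name.toList.length]
    exact (bsearch_eq (feasB name kit L) M hc
      (PySem.Str.len name - 0).toNat 0 (PySem.Str.len name) le_rfl le_rfl hM0 hMn).symm

-- ===== VERDICT (by name: the statement is the Claim_ definition above) =====
theorem solve_spec : Claim_equal_solve := by
  intro name kit _
  unfold Spec_solve
  exact solve_eq_alt name kit
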